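-- pv_equiv track=rewrite | github.com/Heshan-Sandamal/advent-of-code-2023 | dec-14/puzzle-2.py | tilt_row
-- ===== SOURCE A (Python) =====
-- def tilt_row(row):
--     new_row = row[:]
--     possible_index = 0
--     for index, value in enumerate(row):
--         if (value == "O"):
--             if (index != possible_index):
--                 new_row[possible_index] = "O"
--                 new_row[index] = "."
--             possible_index += 1
--         elif (value == "#"):
--             possible_index = index + 1
--     return new_row
-- ===== SOURCE B (Python) =====
-- def tilt_row(row):
--     result = []
--     segment = []
--     for ch in row:
--         if ch == "#":
--             c = segment.count("O")
--             result.extend(["O"] * c)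
--             result.extend("." if x == "O" else x for x in segment[c:])
--             result.append("#")
--             segment = []
--         else:
--             segment.append(ch)
--     c = segment.count("O")
--     result.extend(["O"] * c)
--     result.extend("." if x == "O" else x for x in segment[c:])
--     return result
-- ===== Notes on version B (the rewrite author's own statement) =====
-- stated objective: alternative
-- what changed: Replaces A's two-pointer in-place move over an index/enumerate scan with a segment-buffer rebuild: non-'#' characters are buffered, and on each '#' (and at the end) the segment is flushed as count('O') 'O's followed by the tail of the segment with 'O' mapped to '.'.
import Mathlib
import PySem

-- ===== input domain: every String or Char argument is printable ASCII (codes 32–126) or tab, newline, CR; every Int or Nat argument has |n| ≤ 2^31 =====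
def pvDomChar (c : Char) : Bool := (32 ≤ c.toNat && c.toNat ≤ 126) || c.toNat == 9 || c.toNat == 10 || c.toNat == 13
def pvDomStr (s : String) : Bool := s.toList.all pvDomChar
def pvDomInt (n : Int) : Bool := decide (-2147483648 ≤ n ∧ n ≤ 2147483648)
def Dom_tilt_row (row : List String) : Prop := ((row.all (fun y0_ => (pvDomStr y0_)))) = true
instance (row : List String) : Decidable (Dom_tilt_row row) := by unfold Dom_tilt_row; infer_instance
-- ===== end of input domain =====

-- B replaces A's two-pointer in-place move with a segment-buffer rebuild (flush count('O') 'O's then the mapped tail at each '#' and at the end); alternative decomposition, same O(n) cost.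


-- ===== PORT A =====
-- loop body of A's 'for index, value in enumerate(row)'
def pvStepA (st : List String × Int) (iv : Int × String) : List String × Int :=
  if iv.2 = "O" then
    if iv.1 ≠ st.2 then
      (PySem.List.pySetD (PySem.List.pySetD st.1 st.2 "O") iv.1 ".", st.2 + 1)
    else (st.1, st.2 + 1)
  else if iv.2 = "#" then (st.1, iv.1 + 1)
  else (st.1, st.2)

def tilt_row (row : List String) : List String :=
  ((PySem.List.enumerate row 0).foldl pvStepA (row, 0)).1

-- ===== PORT B =====
-- flush of the pending segment: count('O') 'O's, then the tail with 'O' mapped to '.'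
def pvFlush (seg : List String) : List String :=
  List.replicate (seg.count "O") "O"
    ++ (seg.drop (seg.count "O")).map (fun x => if x = "O" then "." else x)

-- loop body of B's 'for ch in row' over state (result, segment)
def pvStepB (st : List String × List String) (ch : String) : List String × List String :=
  if ch = "#" then (st.1 ++ pvFlush st.2 ++ ["#"], [])
  else (st.1, st.2 ++ [ch])

def tilt_row_alt (row : List String) : List String :=
  let st := row.foldl pvStepB ([], [])
  st.1 ++ pvFlush st.2

-- ===== PRECONDITION & SPEC =====
def Spec_tilt_row (row : List String) (out : List String) : Prop := out = tilt_row_alt row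
instance (row : List String) (out : List String) : Decidable (Spec_tilt_row row out) := by unfold Spec_tilt_row; infer_instance

-- ===== CLAIM (what is proved, stated in full; the proofs are below) =====
def Claim_equal_tilt_row : Prop := ∀ (row : List String), Dom_tilt_row row → Spec_tilt_row row (tilt_row row)

-- ===== LEMMAS AND PROOFS =====

theorem pvFlush_length (seg : List String) : (pvFlush seg).length = seg.length := by
  have h : seg.count "O" ≤ seg.length := List.count_le_length
  simp [pvFlush]
  omega

-- flushing is unchanged by appending a non-'O' character
theorem pvFlush_snoc_other (seg : List String) (ch : String) (h : ch ≠ "O") :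
    pvFlush (seg ++ [ch]) = pvFlush seg ++ [ch] := by
  have hc : seg.count "O" ≤ seg.length := List.count_le_length
  have h0 : seg.count "O" - seg.length = 0 := by omega
  simp [pvFlush, List.count_append, List.drop_append, h, h0]

-- appending 'O' to an all-'O' segment
theorem pvFlush_snoc_O_full (seg : List String) (h : seg.count "O" = seg.length) :
    pvFlush (seg ++ ["O"]) = pvFlush seg ++ ["O"] := by
  have h1 : seg.length + 1 - seg.length = 1 := by omega
  simp [pvFlush, List.count_append, List.drop_append, h, h1,
    List.replicate_succ']

theorem pvFlush_nil : pvFlush [] = [] := by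
  simp [pvFlush]

-- the two writes A performs when it moves an 'O', at segment level
theorem pv_seg_move (seg rest : List String) (h : seg.count "O" < seg.length) :
    ((pvFlush seg ++ "O" :: rest).set (seg.count "O") "O").set seg.length "."
      = pvFlush (seg ++ ["O"]) ++ rest := by
  have hlt : seg.count "O" < (pvFlush seg).length := by rw [pvFlush_length]; exact h
  rw [List.set_append_left _ _ hlt,
      List.set_append_right _ _ (le_of_eq (by simp [pvFlush_length]))]
  simp only [List.length_set, pvFlush_length, Nat.sub_self, List.set_cons_zero]
  have hset : (pvFlush seg).set (seg.count "O") "O"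
      = List.replicate (seg.count "O" + 1) "O"
        ++ (seg.drop (seg.count "O" + 1)).map (fun x => if x = "O" then "." else x) := by
    rw [pvFlush, List.set_append_right _ _ (by simp)]
    simp only [List.length_replicate, Nat.sub_self]
    rw [List.drop_eq_getElem_cons h]
    simp only [List.map_cons, List.set_cons_zero, List.replicate_succ', List.append_assoc,
      List.singleton_append]
  have hflush : pvFlush (seg ++ ["O"])
      = List.replicate (seg.count "O" + 1) "O"
        ++ (seg.drop (seg.count "O" + 1)).map (fun x => if x = "O" then "." else x)
        ++ ["."] := by
    have h0 : seg.count "O" + 1 - seg.length = 0 := by omega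
    simp [pvFlush, List.count_append, List.drop_append, h0, List.append_assoc]
  rw [hset, hflush]
  simp [List.append_assoc]

-- the same two writes with the already-emitted prefix in front
theorem pv_move_full (done seg rest : List String) (h : seg.count "O" < seg.length) :
    ((done ++ pvFlush seg ++ "O" :: rest).set (done.length + seg.count "O") "O").set
        (done.length + seg.length) "."
      = done ++ pvFlush (seg ++ ["O"]) ++ rest := by
  rw [List.append_assoc]
  rw [List.set_append_right _ _ (Nat.le_add_right _ _), Nat.add_sub_cancel_left]
  rw [List.set_append_right _ _ (Nat.le_add_right _ _), Nat.add_sub_cancel_left]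
  rw [List.append_assoc]
  exact congrArg (done ++ ·) (pv_seg_move seg rest h)

-- main loop invariant: A's fold over the remaining elements, started from a list laid
-- out as done ++ pvFlush seg ++ rest, produces exactly B's fold result
theorem pv_inv (rest : List String) : ∀ (done seg : List String),
    ((PySem.List.enumerate rest ((done.length + seg.length : Nat) : Int)).foldl pvStepA
        (done ++ pvFlush seg ++ rest, ((done.length + seg.count "O" : Nat) : Int))).1
    = (rest.foldl pvStepB (done, seg)).1 ++ pvFlush (rest.foldl pvStepB (done, seg)).2 := by
  induction rest with
  | nil => intro done seg; simp [PySem.List.enumerate]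
  | cons ch rest ih =>
    intro done seg
    have hc : seg.count "O" ≤ seg.length := List.count_le_length
    rw [PySem.List.enumerate_cons, List.foldl_cons, List.foldl_cons]
    by_cases h1 : ch = "#"
    · subst h1
      have hstep : pvStepA (done ++ pvFlush seg ++ "#" :: rest,
            ((done.length + seg.count "O" : Nat) : Int))
            (((done.length + seg.length : Nat) : Int), "#")
          = (done ++ pvFlush seg ++ "#" :: rest,
            ((done.length + seg.length : Nat) : Int) + 1) := by
        simp [pvStepA]
      rw [hstep, show pvStepB (done, seg) "#" = (done ++ pvFlush seg ++ ["#"], []) from by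
        simp [pvStepB]]
      have := ih (done ++ pvFlush seg ++ ["#"]) []
      have e1 : ((done ++ pvFlush seg ++ ["#"]).length + List.count "O" ([] : List String) : Nat)
          = done.length + seg.length + 1 := by
        simp only [List.length_append, pvFlush_length, List.length_cons, List.length_nil,
          List.count_nil]
        try omega
      have e2 : ((done ++ pvFlush seg ++ ["#"]).length + ([] : List String).length : Nat)
          = done.length + seg.length + 1 := by
        simp only [List.length_append, pvFlush_length, List.length_cons, List.length_nil]
        try omega
      rw [e1, e2] at this
      have e3 : ((done.length + seg.length + 1 : Nat) : Int)
          = ((done.length + seg.length : Nat) : Int) + 1 := by push_cast; ring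
      rw [e3] at this
      simpa [pvFlush_nil] using this
    · by_cases h2 : ch = "O"
      · subst h2
        by_cases h3 : seg.count "O" = seg.length
        · -- index equals possible_index: no write
          have hstep : pvStepA (done ++ pvFlush seg ++ "O" :: rest,
                ((done.length + seg.count "O" : Nat) : Int))
                (((done.length + seg.length : Nat) : Int), "O")
              = (done ++ pvFlush seg ++ "O" :: rest,
                ((done.length + seg.count "O" : Nat) : Int) + 1) := by
            simp [pvStepA, h3]
          rw [hstep, show pvStepB (done, seg) "O" = (done, seg ++ ["O"]) from by simp [pvStepB]]
          have := ih done (seg ++ ["O"])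
          rw [pvFlush_snoc_O_full seg h3] at this
          have harith : ((done.length + seg.count "O" : Nat) : Int) + 1
              = ((done.length + (seg ++ ["O"]).count "O" : Nat) : Int) := by
            simp [List.count_append]; ring
          have harith2 : ((done.length + seg.length : Nat) : Int) + 1
              = ((done.length + (seg ++ ["O"]).length : Nat) : Int) := by
            simp; ring
          rw [harith, harith2]
          simpa using this
        · -- A moves the 'O' with two writes
          have h4 : seg.count "O" < seg.length := lt_of_le_of_ne hc h3
          have hne : (((done.length + seg.length : Nat) : Int))
              ≠ ((done.length + seg.count "O" : Nat) : Int) := by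
            intro hcontra
            have : done.length + seg.length = done.length + seg.count "O" := by
              exact_mod_cast hcontra
            omega
          have hstep : pvStepA (done ++ pvFlush seg ++ "O" :: rest,
                ((done.length + seg.count "O" : Nat) : Int))
                (((done.length + seg.length : Nat) : Int), "O")
              = (PySem.List.pySetD (PySem.List.pySetD
                    (done ++ pvFlush seg ++ "O" :: rest)
                    ((done.length + seg.count "O" : Nat) : Int) "O")
                  ((done.length + seg.length : Nat) : Int) ".",
                ((done.length + seg.count "O" : Nat) : Int) + 1) := by
            simp [pvStepA]
            intro hx
            exact absurd hx.symm h3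
          rw [hstep, show pvStepB (done, seg) "O" = (done, seg ++ ["O"]) from by simp [pvStepB]]
          -- evaluate the two writes
          have hw : PySem.List.pySetD (PySem.List.pySetD
                (done ++ pvFlush seg ++ "O" :: rest)
                ((done.length + seg.count "O" : Nat) : Int) "O")
              ((done.length + seg.length : Nat) : Int) "."
              = done ++ pvFlush (seg ++ ["O"]) ++ rest := by
            rw [PySem.List.pySetD_natCast, PySem.List.pySetD_natCast]
            exact pv_move_full done seg rest h4
          rw [hw]
          have := ih done (seg ++ ["O"])
          have harith : ((done.length + seg.count "O" : Nat) : Int) + 1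
              = ((done.length + (seg ++ ["O"]).count "O" : Nat) : Int) := by
            simp [List.count_append]; ring
          have harith2 : ((done.length + seg.length : Nat) : Int) + 1
              = ((done.length + (seg ++ ["O"]).length : Nat) : Int) := by
            simp; ring
          rw [harith, harith2]
          simpa using this
      · -- ordinary character: both sides just keep it
        have hstep : pvStepA (done ++ pvFlush seg ++ ch :: rest,
              ((done.length + seg.count "O" : Nat) : Int))
              (((done.length + seg.length : Nat) : Int), ch)
            = (done ++ pvFlush seg ++ ch :: rest,
              ((done.length + seg.count "O" : Nat) : Int)) := by
          simp [pvStepA, h1, h2]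
        rw [hstep, show pvStepB (done, seg) ch = (done, seg ++ [ch]) from by simp [pvStepB, h1]]
        have := ih done (seg ++ [ch])
        rw [pvFlush_snoc_other seg ch h2] at this
        have harith : ((done.length + seg.count "O" : Nat) : Int)
            = ((done.length + (seg ++ [ch]).count "O" : Nat) : Int) := by
          simp [List.count_append, h2]
        have harith2 : ((done.length + seg.length : Nat) : Int) + 1
            = ((done.length + (seg ++ [ch]).length : Nat) : Int) := by
          simp; ring
        rw [harith, harith2]
        simpa using this

-- ===== VERDICT (by name: the statement is the Claim_ definition above) =====
theorem tilt_row_spec : Claim_equal_tilt_row := by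
  intro row _
  show tilt_row row = tilt_row_alt row
  have h := pv_inv row [] []
  simpa [tilt_row, tilt_row_alt, pvFlush] using h
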